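-- pv_equiv track=rewrite | github.com/cecile90-romaine/ITS-Python | esercizio_recupero/liste_turple_dict1.py | convert_list_tuple_to_dict
-- ===== SOURCE A (Python) =====
-- def convert_list_tuple_to_dict(list_1: list[tuple]) -> dict:
--
--     dict_1: dict = {}
--
--     for element in list_1:
--
--         key, value = element[0], element[1]
--
--         if key in dict_1:
--
--             dict_1[key] += value
--
--         else:
--
--             dict_1[key] = value
--
--     return dict_1
-- ===== SOURCE B (Python) =====
-- def convert_list_tuple_to_dict(list_1: list[tuple]) -> dict:
--     # Two-pass decomposition: first group every value under its key,
--     # then reduce each bucket with in-place += starting from its first element.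
--     groups: dict = {}
--     for element in list_1:
--         groups.setdefault(element[0], []).append(element[1])
--     result: dict = {}
--     for key, values in groups.items():
--         acc = values[0]
--         for v in values[1:]:
--             acc += v
--         result[key] = acc
--     return result
-- ===== Notes on version B (the rewrite author's own statement) =====
-- stated objective: alternative
-- what changed: Replaces the single lookup-and-update loop by a two-pass grouping decomposition: one pass buckets all values per key via setdefault/append, a second pass reduces each bucket with in-place += into the result dict.
import Mathlib
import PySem

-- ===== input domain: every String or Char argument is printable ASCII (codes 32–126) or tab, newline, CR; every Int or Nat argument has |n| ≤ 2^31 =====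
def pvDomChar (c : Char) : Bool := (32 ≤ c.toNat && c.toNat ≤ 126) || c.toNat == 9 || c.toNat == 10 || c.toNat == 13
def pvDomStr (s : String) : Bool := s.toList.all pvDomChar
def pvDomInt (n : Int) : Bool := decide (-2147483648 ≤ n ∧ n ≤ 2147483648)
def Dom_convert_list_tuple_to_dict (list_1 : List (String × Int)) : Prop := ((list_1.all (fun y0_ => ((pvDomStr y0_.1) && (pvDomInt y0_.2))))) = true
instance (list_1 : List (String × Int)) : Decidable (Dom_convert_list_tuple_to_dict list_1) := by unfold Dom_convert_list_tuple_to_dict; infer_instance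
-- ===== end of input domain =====

-- B replaces A's lookup-and-update loop by a two-pass grouping decomposition (bucket values per key, then reduce each bucket); same cost, equivalent result.

-- ===== PORT A =====
def convert_list_tuple_to_dict (list_1 : List (String × Int)) : List (String × Int) :=
  (list_1.foldl (fun dict_1 element =>
      -- 'if key in dict_1: dict_1[key] += value else: dict_1[key] = value'
      -- (membership test ported via get?: key in dict_1 ↔ get? is some)
      match dict_1.get? element.1 with
      | some w => dict_1.insert element.1 (w + element.2)
      | none => dict_1.insert element.1 element.2)
    (PySem.Dict.empty : PySem.Dict String Int)).items

-- ===== PORT B =====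
-- inner reduction of Source B: acc = values[0]; for v in values[1:]: acc += v
def pvRed (values : List Int) : Int :=
  match values with
  | [] => 0            -- unreachable: every bucket built by the grouping pass is nonempty
  | v :: rest => rest.foldl (· + ·) v

def convert_list_tuple_to_dict_alt (list_1 : List (String × Int)) : List (String × Int) :=
  -- first pass: groups.setdefault(element[0], []).append(element[1])  (= modify with default [])
  let groups : PySem.Dict String (List Int) :=
    list_1.foldl (fun g element => g.modify element.1 [] (fun vs => vs ++ [element.2])) PySem.Dict.empty
  -- second pass: for key, values in groups.items(): result[key] = reduce(values)
  let result : PySem.Dict String Int :=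
    groups.items.foldl (fun r p => r.insert p.1 (pvRed p.2)) PySem.Dict.empty
  result.items

-- ===== PRECONDITION & SPEC =====
def Spec_convert_list_tuple_to_dict (list_1 : List (String × Int)) (out : List (String × Int)) : Prop := out = convert_list_tuple_to_dict_alt list_1
instance (list_1 : List (String × Int)) (out : List (String × Int)) : Decidable (Spec_convert_list_tuple_to_dict list_1 out) := by unfold Spec_convert_list_tuple_to_dict; infer_instance

-- ===== CLAIM (what is proved, stated in full; the proofs are below) =====
def Claim_equal_convert_list_tuple_to_dict : Prop := ∀ (list_1 : List (String × Int)), Dom_convert_list_tuple_to_dict list_1 → Spec_convert_list_tuple_to_dict list_1 (convert_list_tuple_to_dict list_1)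

-- ===== LEMMAS AND PROOFS =====

theorem pvRed_append (vs : List Int) (v : Int) : pvRed (vs ++ [v]) = pvRed vs + v := by
  cases vs with
  | nil => simp [pvRed]
  | cons x r => simp [pvRed, List.foldl_append]

theorem pvGet?_map_red (l : List (String × List Int)) (k : String) :
    (PySem.Dict.mk (l.map (fun p => (p.1, pvRed p.2)))).get? k
      = ((PySem.Dict.mk l).get? k).map pvRed := by
  induction l with
  | nil => rfl
  | cons p l ih =>
      obtain ⟨a, b⟩ := p
      simp only [List.map_cons, PySem.Dict.get?_mk_cons]
      split_ifs with hak
      · rfl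
      · exact ih

theorem pv_step_inv (g : PySem.Dict String (List Int)) (d : PySem.Dict String Int)
    (h : d.items = g.items.map (fun p => (p.1, pvRed p.2))) (k : String) (v : Int) :
    (match d.get? k with
     | some w => d.insert k (w + v)
     | none => d.insert k v).items
    = (g.modify k [] (fun vs => vs ++ [v])).items.map (fun p => (p.1, pvRed p.2)) := by
  have hd : d = PySem.Dict.mk (g.items.map (fun p => (p.1, pvRed p.2))) := PySem.Dict.ext h
  have hg : d.get? k = (g.get? k).map pvRed := by
    rw [hd]; exact pvGet?_map_red g.items k
  cases hgk : g.get? k with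
  | none =>
      have hdk : d.get? k = none := by rw [hg, hgk]; rfl
      have hcg : g.contains k = false := by
        rw [PySem.Dict.contains_eq_isSome_get?, hgk]; rfl
      have hcd : d.contains k = false := by
        rw [PySem.Dict.contains_eq_isSome_get?, hdk]; rfl
      have hgd : g.getD k [] = [] := PySem.Dict.getD_of_get?_eq_none g [] hgk
      simp only [hdk, PySem.Dict.modify, hgd]
      rw [PySem.Dict.items_insert_of_not_contains _ _ hcd,
          PySem.Dict.items_insert_of_not_contains _ _ hcg, h]
      simp [pvRed]
  | some vs =>
      have hdk : d.get? k = some (pvRed vs) := by rw [hg, hgk]; rfl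
      have hcg : g.contains k = true := by
        rw [PySem.Dict.contains_eq_isSome_get?, hgk]; rfl
      have hcd : d.contains k = true := by
        rw [PySem.Dict.contains_eq_isSome_get?, hdk]; rfl
      have hgd : g.getD k [] = vs := PySem.Dict.getD_of_get?_eq_some g [] hgk
      simp only [hdk, PySem.Dict.modify, hgd]
      rw [PySem.Dict.items_insert_of_contains _ _ hcd,
          PySem.Dict.items_insert_of_contains _ _ hcg, h]
      rw [List.map_map, List.map_map]
      refine List.map_congr_left (fun p _ => ?_)
      by_cases hp : (p.1 == k) = true <;> simp [Function.comp, hp, pvRed_append]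

theorem pv_loop_inv (l : List (String × Int)) :
    ∀ (g : PySem.Dict String (List Int)) (d : PySem.Dict String Int),
    d.items = g.items.map (fun p => (p.1, pvRed p.2)) →
    (l.foldl (fun dict_1 element =>
        match dict_1.get? element.1 with
        | some w => dict_1.insert element.1 (w + element.2)
        | none => dict_1.insert element.1 element.2) d).items
    = (l.foldl (fun g element => g.modify element.1 [] (fun vs => vs ++ [element.2])) g).items.map
        (fun p => (p.1, pvRed p.2)) := by
  induction l with
  | nil => intro g d h; simpa using h
  | cons e l ih =>
      intro g d h
      simp only [List.foldl_cons]
      exact ih _ _ (pv_step_inv g d h e.1 e.2)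

-- ===== VERDICT (by name: the statement is the Claim_ definition above) =====
theorem convert_list_tuple_to_dict_spec : Claim_equal_convert_list_tuple_to_dict := by
  intro list_1 _
  unfold Spec_convert_list_tuple_to_dict convert_list_tuple_to_dict convert_list_tuple_to_dict_alt
  set groups := list_1.foldl (fun g element => g.modify element.1 [] (fun vs => vs ++ [element.2]))
      (PySem.Dict.empty : PySem.Dict String (List Int)) with hgroups
  have hnd : groups.keys.Nodup := by
    rw [hgroups]
    exact PySem.Dict.nodup_keys_foldl_modify_key list_1 (fun e => e.1) []
      (fun _ element => fun vs => vs ++ [element.2]) PySem.Dict.empty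
      (PySem.Dict.nodup_keys_empty)
  have hres : (groups.items.foldl (fun r p => r.insert p.1 (pvRed p.2))
      (PySem.Dict.empty : PySem.Dict String Int)).items
      = groups.items.map (fun p => (p.1, pvRed p.2)) := by
    have := PySem.Dict.items_foldl_insert_fresh groups.items (fun p => p.1)
      (fun p => pvRed p.2) (PySem.Dict.empty : PySem.Dict String Int)
      (fun a _ => by simp [PySem.Dict.contains_empty]) hnd
    simpa using this
  rw [hres]
  exact pv_loop_inv list_1 PySem.Dict.empty PySem.Dict.empty rfl
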